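-- pv_equiv track=rewrite | github.com/Ho1guma/memory-rd-strategy-agent | agents/analysis.py | _group_evidence_by_company
-- ===== SOURCE A (Python) =====
-- def _group_evidence_by_company(
--     evidence_store: list,
--     competitors: list,
--     technologies: list,
--     max_per_company: int = 10,
-- ) -> tuple[str, dict[str, list[tuple[int, dict]]], str]:
--     """
--     경쟁사×기술별로 증거를 그룹핑.
--     Returns: (formatted_summary, grouped_data, counts_line)
--     """
--     grouped: dict[str, list[tuple[int, dict]]] = {c: [] for c in competitors}
--
--     for i, item in enumerate(evidence_store):
--         text = (item.get("title", "") + " " + item.get("snippet", "")).lower()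
--         matched = False
--         for company in competitors:
--             if company.lower() in text:
--                 grouped[company].append((i, item))
--                 matched = True
--         # 본문에 회사명 없지만 해당 회사 쿼리로 수집된 증거 → query_company로 폴백 매핑
--         if not matched and item.get("query_company") in grouped:
--             grouped[item["query_company"]].append((i, item))
--
--     lines = []
--     count_parts = []
--
--     for company in competitors:
--         items = grouped[company]
--         tech_counts = {}
--         for tech in technologies:
--             tech_count = sum(
--                 1 for _, it in items
--                 if tech.lower() in (it.get("title", "") + " " + it.get("snippet", "")).lower()
--             )
--             tech_counts[tech] = tech_count
--
--         tech_str = ", ".join(f"{t}: {tech_counts[t]}건" for t in technologies)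
--         count_parts.append(f"- {company}: 총 {len(items)}건 ({tech_str})")
--
--         lines.append(f"\n### {company} 관련 증거 ({len(items)}건)")
--         for idx, item in items[:max_per_company]:
--             lines.append(
--                 f"  [{idx + 1}] {item.get('title', '')} ({item.get('date', 'N/A')})\n"
--                 f"      {item.get('snippet', '')[:180]}\n"
--                 f"      출처: {item.get('url', '')}"
--             )
--         if len(items) > max_per_company:
--             lines.append(f"  ... 외 {len(items) - max_per_company}건")
--
--     return "\n".join(lines), grouped, "\n".join(count_parts)
-- ===== SOURCE B (Python) =====
-- def _group_evidence_by_company(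
--     evidence_store: list,
--     competitors: list,
--     technologies: list,
--     max_per_company: int = 10,
-- ) -> tuple:
--     # One pass over the evidence: lowercase each item's text once, record which
--     # companies it matches and a 0/1 vector of technology hits; the per-company
--     # tech counts are then vector sums instead of per-tech rescans.
--     low_comps = [(c, c.lower()) for c in competitors]
--     low_techs = [t.lower() for t in technologies]
--
--     grouped = {c: [] for c in competitors}
--     recs = {c: [] for c in competitors}          # parallel lists of tech-hit vectors
--
--     for i, item in enumerate(evidence_store):
--         text = (item.get("title", "") + " " + item.get("snippet", "")).lower()
--         flags = [1 if t in text else 0 for t in low_techs]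
--         hits = [c for c, cl in low_comps if cl in text]
--         if not hits:
--             qc = item.get("query_company")
--             hits = [qc] if qc in recs else []
--         for c in hits:
--             grouped[c].append((i, item))
--             recs[c].append(flags)
--
--     def _block(company):
--         items = grouped[company]
--         n = len(items)
--         totals = [0] * len(technologies)
--         for f in recs[company]:
--             totals = [a + b for a, b in zip(totals, f)]
--         tech_str = ", ".join(f"{t}: {cnt}건" for t, cnt in zip(technologies, totals))
--         count_part = f"- {company}: 총 {n}건 ({tech_str})"
--         lines = [f"\n### {company} 관련 증거 ({n}건)"]
--         for idx, item in items[:max_per_company]: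
--             lines.append(
--                 f"  [{idx + 1}] {item.get('title', '')} ({item.get('date', 'N/A')})\n"
--                 f"      {item.get('snippet', '')[:180]}\n"
--                 f"      출처: {item.get('url', '')}"
--             )
--         if n > max_per_company:
--             lines.append(f"  ... 외 {n - max_per_company}건")
--         return lines, count_part
--
--     pairs = [_block(c) for c in competitors]
--     return (
--         "\n".join(x for p in pairs for x in p[0]),
--         grouped,
--         "\n".join(p[1] for p in pairs),
--     )
-- ===== Notes on version B (the rewrite author's own statement) =====
-- stated objective: alternative
-- what changed: B lowercases each evidence text once and precomputes per-item 0/1 technology-hit vectors in the single grouping pass, then derives each company's tech counts by summing the stored vectors, instead of A's per-company-per-tech rescans that rebuild and re-lowercase every grouped text (intended as faster; the probe measured 2.86x at n=1024 but both timed out at n=4096, so no speed is claimed).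
import Mathlib
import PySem

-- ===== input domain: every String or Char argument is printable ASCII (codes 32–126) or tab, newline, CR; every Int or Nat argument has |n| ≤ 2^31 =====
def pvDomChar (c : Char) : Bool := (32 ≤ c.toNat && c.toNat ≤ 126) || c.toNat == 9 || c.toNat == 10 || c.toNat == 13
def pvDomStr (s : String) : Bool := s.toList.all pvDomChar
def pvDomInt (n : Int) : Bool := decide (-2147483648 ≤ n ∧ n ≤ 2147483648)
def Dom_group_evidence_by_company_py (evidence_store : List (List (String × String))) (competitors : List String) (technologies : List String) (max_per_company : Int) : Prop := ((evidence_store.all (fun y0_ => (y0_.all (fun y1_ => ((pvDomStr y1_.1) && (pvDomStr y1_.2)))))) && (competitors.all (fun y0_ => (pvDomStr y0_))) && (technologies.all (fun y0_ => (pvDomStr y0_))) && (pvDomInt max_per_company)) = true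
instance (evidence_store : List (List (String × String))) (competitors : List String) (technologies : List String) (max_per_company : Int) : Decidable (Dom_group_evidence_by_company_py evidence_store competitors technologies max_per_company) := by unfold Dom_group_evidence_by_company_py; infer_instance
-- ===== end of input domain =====

-- B lowercases each evidence text once and aggregates per-company tech counts from precomputed
-- 0/1 hit vectors in one pass, instead of A's per-tech rescans that re-lowercase every text.

-- ===== PORT A =====
-- item.get(k, dflt) on an evidence dict (assoc list, first match)
def pvGetD (item : List (String × String)) (k dflt : String) : String :=
  ((PySem.Dict.mk item).get? k).getD dflt

-- (item.get("title","") + " " + item.get("snippet","")).lower()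
def pvTextOf (item : List (String × String)) : String :=
  PySem.Str.lower (pvGetD item "title" "" ++ " " ++ pvGetD item "snippet" "")

-- the f-string for one listed evidence item
def pvFmtItem (p : Int × List (String × String)) : String :=
  "  [" ++ PySem.Int.toStr (p.1 + 1) ++ "] " ++ pvGetD p.2 "title" "" ++ " (" ++ pvGetD p.2 "date" "N/A" ++ ")\n      "
    ++ PySem.Str.slice (pvGetD p.2 "snippet" "") none (some 180) ++ "\n      출처: " ++ pvGetD p.2 "url" ""

-- body of A's `for i, item in enumerate(evidence_store)` loop
def pvAStep (competitors : List String) (g : PySem.Dict String (List (Int × List (String × String)))) (p : Int × List (String × String)) : PySem.Dict String (List (Int × List (String × String))) :=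
  let i := p.1
  let item := p.2
  let text := pvTextOf item
  let st := competitors.foldl (fun (st : _ × Bool) company =>
    if PySem.Str.isIn (PySem.Str.lower company) text then
      (st.1.modify company [] (· ++ [(i, item)]), true)
    else st) (g, false)
  if st.2 then st.1
  else
    -- item.get("query_company") in grouped  (None is never a key)
    match (PySem.Dict.mk item).get? "query_company" with
    | some qc => if st.1.contains qc then st.1.modify qc [] (· ++ [(i, item)]) else st.1
    | none => st.1

-- body of A's `for company in competitors` summary loop; state = (lines, count_parts)
def pvASummary (technologies : List String) (max_per_company : Int) (grouped : PySem.Dict String (List (Int × List (String × String)))) (st : List String × List String) (company : String) : List String × List String :=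
  let items := grouped.getD company []      -- grouped[company]: key always present
  let tech_counts : PySem.Dict String Int := technologies.foldl (fun d tech =>
    d.insert tech ((items.map (fun q => if PySem.Str.isIn (PySem.Str.lower tech) (pvTextOf q.2) then (1:Int) else 0)).sum)) PySem.Dict.empty
  let tech_str := PySem.Str.join ", " (technologies.map (fun t =>
    t ++ ": " ++ PySem.Int.toStr (tech_counts.getD t 0) ++ "건"))   -- tech_counts[t]: key always present
  let count_parts := st.2 ++ ["- " ++ company ++ ": 총 " ++ PySem.Int.toStr (items.length : Int) ++ "건 (" ++ tech_str ++ ")"]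
  let lines := st.1 ++ ["\n### " ++ company ++ " 관련 증거 (" ++ PySem.Int.toStr (items.length : Int) ++ "건)"]
  let lines := (PySem.List.slice items none (some max_per_company)).foldl (fun ls q => ls ++ [pvFmtItem q]) lines
  let lines := if (items.length : Int) > max_per_company then
      lines ++ ["  ... 외 " ++ PySem.Int.toStr ((items.length : Int) - max_per_company) ++ "건"]
    else lines
  (lines, count_parts)

def group_evidence_by_company_py (evidence_store : List (List (String × String))) (competitors : List String) (technologies : List String) (max_per_company : Int) : String × (List (String × List (Int × (List (String × String))))) × String :=
  -- grouped = {c: [] for c in competitors}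
  let g0 : PySem.Dict String (List (Int × List (String × String))) :=
    competitors.foldl (fun d c => d.insert c []) PySem.Dict.empty
  let grouped := (PySem.List.enumerate evidence_store).foldl (pvAStep competitors) g0
  let st := competitors.foldl (pvASummary technologies max_per_company grouped) ([], [])
  (PySem.Str.join "\n" st.1, grouped.items, PySem.Str.join "\n" st.2)

-- ===== PORT B =====
-- body of B's single evidence pass; state = (grouped, recs)
def pvBStep (low_comps : List (String × String)) (low_techs : List String) (st : PySem.Dict String (List (Int × List (String × String))) × PySem.Dict String (List (List Int))) (p : Int × List (String × String)) : PySem.Dict String (List (Int × List (String × String))) × PySem.Dict String (List (List Int)) :=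
  let i := p.1
  let item := p.2
  let text := PySem.Str.lower (pvGetD item "title" "" ++ " " ++ pvGetD item "snippet" "")
  let flags := low_techs.map (fun t => if PySem.Str.isIn t text then (1:Int) else 0)
  let hits := (low_comps.filter (fun q => PySem.Str.isIn q.2 text)).map (·.1)
  let hits := if hits.isEmpty then
      match (PySem.Dict.mk item).get? "query_company" with
      | some qc => if st.2.contains qc then [qc] else []
      | none => []
    else hits
  hits.foldl (fun st c =>
    (st.1.modify c [] (· ++ [(i, item)]), st.2.modify c [] (· ++ [flags]))) st

-- B's _block(company): the lines of one company's section and its count line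
def pvBBlock (grouped : PySem.Dict String (List (Int × List (String × String)))) (recs : PySem.Dict String (List (List Int))) (technologies : List String) (max_per_company : Int) (company : String) : List String × String :=
  let items := grouped.getD company []
  let n : Int := (items.length : Int)
  let totals := (recs.getD company []).foldl (fun tot f =>
    (tot.zip f).map (fun q => q.1 + q.2)) (technologies.map (fun _ => (0:Int)))
  let tech_str := PySem.Str.join ", " ((technologies.zip totals).map (fun q =>
    q.1 ++ ": " ++ PySem.Int.toStr q.2 ++ "건"))
  let count_part := "- " ++ company ++ ": 총 " ++ PySem.Int.toStr n ++ "건 (" ++ tech_str ++ ")"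
  let lines := ("\n### " ++ company ++ " 관련 증거 (" ++ PySem.Int.toStr n ++ "건)")
    :: (PySem.List.slice items none (some max_per_company)).map pvFmtItem
    ++ (if n > max_per_company then ["  ... 외 " ++ PySem.Int.toStr (n - max_per_company) ++ "건"] else [])
  (lines, count_part)

def group_evidence_by_company_py_alt (evidence_store : List (List (String × String))) (competitors : List String) (technologies : List String) (max_per_company : Int) : String × (List (String × List (Int × (List (String × String))))) × String :=
  let low_comps := competitors.map (fun c => (c, PySem.Str.lower c))
  let low_techs := technologies.map PySem.Str.lower
  let g0 : PySem.Dict String (List (Int × List (String × String))) :=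
    competitors.foldl (fun d c => d.insert c []) PySem.Dict.empty
  let r0 : PySem.Dict String (List (List Int)) :=
    competitors.foldl (fun d c => d.insert c []) PySem.Dict.empty
  let st := (PySem.List.enumerate evidence_store).foldl (pvBStep low_comps low_techs) (g0, r0)
  let pairs := competitors.map (pvBBlock st.1 st.2 technologies max_per_company)
  (PySem.Str.join "\n" (pairs.flatMap (·.1)), st.1.items, PySem.Str.join "\n" (pairs.map (·.2)))

-- ===== PRECONDITION & SPEC =====
def Spec_group_evidence_by_company_py (evidence_store : List (List (String × String))) (competitors : List String) (technologies : List String) (max_per_company : Int) (out : String × (List (String × List (Int × (List (String × String))))) × String) : Prop := out = group_evidence_by_company_py_alt evidence_store competitors technologies max_per_company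
instance (evidence_store : List (List (String × String))) (competitors : List String) (technologies : List String) (max_per_company : Int) (out : String × (List (String × List (Int × (List (String × String))))) × String) : Decidable (Spec_group_evidence_by_company_py evidence_store competitors technologies max_per_company out) := by
  unfold Spec_group_evidence_by_company_py
  -- instance search alone exceeds its size limit on this deeply nested product type; assemble it componentwise
  have h1 : Decidable (out.1 = (group_evidence_by_company_py_alt evidence_store competitors technologies max_per_company).1) := by infer_instance
  have h2 : Decidable (out.2.1 = (group_evidence_by_company_py_alt evidence_store competitors technologies max_per_company).2.1) := by infer_instance
  have h3 : Decidable (out.2.2 = (group_evidence_by_company_py_alt evidence_store competitors technologies max_per_company).2.2) := by infer_instance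
  exact decidable_of_iff (out.1 = (group_evidence_by_company_py_alt evidence_store competitors technologies max_per_company).1 ∧ out.2.1 = (group_evidence_by_company_py_alt evidence_store competitors technologies max_per_company).2.1 ∧ out.2.2 = (group_evidence_by_company_py_alt evidence_store competitors technologies max_per_company).2.2) (by rw [Prod.ext_iff, Prod.ext_iff])

-- ===== CLAIM (what is proved, stated in full; the proofs are below) =====
def Claim_equal_group_evidence_by_company_py : Prop := ∀ (evidence_store : List (List (String × String))) (competitors : List String) (technologies : List String) (max_per_company : Int), Dom_group_evidence_by_company_py evidence_store competitors technologies max_per_company → Spec_group_evidence_by_company_py evidence_store competitors technologies max_per_company (group_evidence_by_company_py evidence_store competitors technologies max_per_company)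

-- ===== LEMMAS AND PROOFS =====

-- the tech-hit vector B stores for an item, phrased over the raw technologies list
def pvFlags (ts : List String) (item : List (String × String)) : List Int :=
  ts.map (fun t => if PySem.Str.isIn (PySem.Str.lower t) (pvTextOf item) then (1 : Int) else 0)

-- A's count of tech t among grouped items
def pvCnt (items : List (Int × List (String × String))) (t : String) : Int :=
  (items.map (fun q => if PySem.Str.isIn (PySem.Str.lower t) (pvTextOf q.2) then (1 : Int) else 0)).sum

-- B's two dicts run in parallel: same keys, recs holds exactly the flag vectors of grouped's items
def pvPar (ts : List String) (g : PySem.Dict String (List (Int × List (String × String)))) (r : PySem.Dict String (List (List Int))) : Prop :=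
  (∀ k, r.contains k = g.contains k) ∧
  (∀ c, r.getD c [] = (g.getD c []).map (fun p => pvFlags ts p.2))

theorem pvGetD_foldl_insert_nil {ν : Type} (l : List String) :
    ∀ d : PySem.Dict String (List ν), (∀ c, d.getD c [] = []) →
      ∀ c, (l.foldl (fun d c => d.insert c []) d).getD c [] = [] := by
  induction l with
  | nil => intro d h c; exact h c
  | cons a l ih =>
    intro d h c
    refine ih _ (fun c' => ?_) c
    rw [PySem.Dict.getD_insert]
    split_ifs <;> simp [h]

theorem pvPar_init (ts comps : List String) :
    pvPar ts (comps.foldl (fun d c => d.insert c []) PySem.Dict.empty)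
            (comps.foldl (fun d c => d.insert c []) PySem.Dict.empty) := by
  constructor
  · intro k
    rw [PySem.Dict.contains_eq_decide_mem_keys, PySem.Dict.contains_eq_decide_mem_keys,
      PySem.Dict.keys_foldl_insert, PySem.Dict.keys_foldl_insert]
    rfl
  · intro c
    rw [pvGetD_foldl_insert_nil comps PySem.Dict.empty (fun _ => by simp) c,
      pvGetD_foldl_insert_nil comps PySem.Dict.empty (fun _ => by simp) c]
    simp

theorem pvPar_modify (ts : List String) {g r} (h : pvPar ts g r) (c : String) (i : Int)
    (item : List (String × String)) :
    pvPar ts (g.modify c [] (· ++ [(i, item)])) (r.modify c [] (· ++ [pvFlags ts item])) := by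
  obtain ⟨h1, h2⟩ := h
  refine ⟨fun k => by rw [PySem.Dict.contains_modify, PySem.Dict.contains_modify, h1], fun c' => ?_⟩
  rw [PySem.Dict.getD_modify, PySem.Dict.getD_modify]
  by_cases hc : c' = c
  · simp [hc, h2 c]
  · simp [hc, h2 c']

theorem pvHitsFold (ts : List String) (i : Int) (item : List (String × String)) (hits : List String) :
    ∀ g r, pvPar ts g r →
      (hits.foldl (fun (st : _ × _) c =>
          (st.1.modify c [] (· ++ [(i, item)]), st.2.modify c [] (· ++ [pvFlags ts item]))) (g, r)).1
        = hits.foldl (fun g c => g.modify c [] (· ++ [(i, item)])) g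
      ∧ pvPar ts
          (hits.foldl (fun (st : _ × _) c =>
            (st.1.modify c [] (· ++ [(i, item)]), st.2.modify c [] (· ++ [pvFlags ts item]))) (g, r)).1
          (hits.foldl (fun (st : _ × _) c =>
            (st.1.modify c [] (· ++ [(i, item)]), st.2.modify c [] (· ++ [pvFlags ts item]))) (g, r)).2 := by
  induction hits with
  | nil => intro g r h; exact ⟨rfl, h⟩
  | cons a l ih =>
    intro g r h
    simpa using ih _ _ (pvPar_modify ts h a i item)

-- A's inner `for company in competitors` pass = fold over the filtered matches, with the matched flag
theorem pvInnerA (comps : List String) (text : String) (i : Int) (item : List (String × String)) :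
    ∀ (g : PySem.Dict String (List (Int × List (String × String)))) (m : Bool),
    comps.foldl (fun (st : _ × Bool) company =>
        if PySem.Str.isIn (PySem.Str.lower company) text then
          (st.1.modify company [] (· ++ [(i, item)]), true)
        else st) (g, m)
      = ((comps.filter (fun c => PySem.Str.isIn (PySem.Str.lower c) text)).foldl
          (fun g c => g.modify c [] (· ++ [(i, item)])) g,
        m || !(comps.filter (fun c => PySem.Str.isIn (PySem.Str.lower c) text)).isEmpty) := by
  induction comps with
  | nil => intro g m; simp
  | cons a l ih =>
    intro g m
    by_cases hm : PySem.Str.isIn (PySem.Str.lower a) text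
    · simp only [List.foldl_cons, List.filter_cons, hm, if_true, ite_true]
      rw [ih]
      simp
    · simp only [List.foldl_cons, List.filter_cons, hm, if_false, ite_false, Bool.false_eq_true]
      rw [ih]

-- one evidence item: B's step tracks A's step and preserves the parallel invariant
set_option maxHeartbeats 1000000 in
theorem pvStep_eq (comps ts : List String) (p : Int × List (String × String)) {g r}
    (h : pvPar ts g r) :
    (pvBStep (comps.map (fun c => (c, PySem.Str.lower c))) (ts.map PySem.Str.lower) (g, r) p).1
      = pvAStep comps g p
    ∧ pvPar ts (pvBStep (comps.map (fun c => (c, PySem.Str.lower c))) (ts.map PySem.Str.lower) (g, r) p).1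
        (pvBStep (comps.map (fun c => (c, PySem.Str.lower c))) (ts.map PySem.Str.lower) (g, r) p).2 := by
  unfold pvAStep pvBStep
  simp only [List.filter_map, List.map_map]
  rw [pvInnerA comps (pvTextOf p.2) p.1 p.2 g false]
  have hcomp : ((fun q : String × String => PySem.Str.isIn q.2 (PySem.Str.lower (pvGetD p.2 "title" "" ++ " " ++ pvGetD p.2 "snippet" ""))) ∘ fun c => (c, PySem.Str.lower c))
      = fun c => PySem.Str.isIn (PySem.Str.lower c) (pvTextOf p.2) := rfl
  have hfst : ((fun q : String × String => q.1) ∘ fun c => (c, PySem.Str.lower c)) = (id : String → String) := rfl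
  have hflags : ((fun t => if PySem.Str.isIn t (PySem.Str.lower (pvGetD p.2 "title" "" ++ " " ++ pvGetD p.2 "snippet" "")) then (1 : Int) else 0) ∘ PySem.Str.lower)
      = fun t => if PySem.Str.isIn (PySem.Str.lower t) (pvTextOf p.2) then (1 : Int) else 0 := rfl
  rw [hcomp, hfst, hflags, List.map_id]
  set F := comps.filter (fun c => PySem.Str.isIn (PySem.Str.lower c) (pvTextOf p.2)) with hF
  by_cases hFe : F.isEmpty
  · have hFnil : F = [] := List.isEmpty_iff.mp hFe
    simp only [hFe, hFnil, List.foldl_nil, Bool.false_or, Bool.not_true, if_true, ite_true, Bool.false_eq_true, if_false, Prod.fst, Prod.snd]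
    cases hqc : (PySem.Dict.mk p.2).get? "query_company" with
    | none => exact ⟨rfl, h⟩
    | some qc =>
      by_cases hc : r.contains qc
      · have hgc : g.contains qc := by rw [← h.1 qc]; exact hc
        simp only [hc, hgc, if_true, ite_true, List.foldl_cons, List.foldl_nil]
        exact ⟨rfl, pvPar_modify ts h qc p.1 p.2⟩
      · have hgc : ¬ g.contains qc = true := by rw [← h.1 qc]; exact hc
        simp only [hc, hgc, Bool.false_eq_true, if_false, ite_false, List.foldl_nil]
        exact ⟨rfl, h⟩
  · simp only [hFe, Bool.false_or, Bool.not_false, if_true, ite_true, Bool.false_eq_true, if_false, Bool.not_eq_true', Prod.fst, Prod.snd]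
    exact pvHitsFold ts p.1 p.2 F g r h

theorem pvGroupFold (comps ts : List String) (l : List (Int × List (String × String))) :
    ∀ g r, pvPar ts g r →
      (l.foldl (pvBStep (comps.map (fun c => (c, PySem.Str.lower c))) (ts.map PySem.Str.lower)) (g, r)).1
        = l.foldl (pvAStep comps) g
      ∧ pvPar ts
          (l.foldl (pvBStep (comps.map (fun c => (c, PySem.Str.lower c))) (ts.map PySem.Str.lower)) (g, r)).1
          (l.foldl (pvBStep (comps.map (fun c => (c, PySem.Str.lower c))) (ts.map PySem.Str.lower)) (g, r)).2 := by
  induction l with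
  | nil => intro g r h; exact ⟨rfl, h⟩
  | cons x l ih =>
    intro g r h
    obtain ⟨h1, h2⟩ := pvStep_eq comps ts x h
    obtain ⟨ih1, ih2⟩ := ih (pvBStep (comps.map (fun c => (c, PySem.Str.lower c))) (ts.map PySem.Str.lower) (g, r) x).1
      (pvBStep (comps.map (fun c => (c, PySem.Str.lower c))) (ts.map PySem.Str.lower) (g, r) x).2 h2
    rw [List.foldl_cons, List.foldl_cons]
    exact ⟨by rw [← h1]; exact ih1, ih2⟩

-- accumulating a zip-sum of per-element vectors = the vector of per-coordinate sums
theorem pvFoldZip {α β : Type} (ts : List β) (gf : α → β → Int) :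
    ∀ (l : List α) (h : β → Int),
    l.foldl (fun tot x => ((tot.zip (ts.map (gf x))).map (fun q => q.1 + q.2))) (ts.map h)
      = ts.map (fun t => h t + (l.map (fun x => gf x t)).sum) := by
  intro l
  induction l with
  | nil => intro h; simp
  | cons x l ih =>
    intro h
    rw [List.foldl_cons, List.zip_map', List.map_map, show ((fun q : Int × Int => q.1 + q.2) ∘ fun a => (h a, gf x a)) = fun a => h a + gf x a from rfl, ih]
    refine List.map_congr_left (fun t _ => ?_)
    simp [add_assoc]

theorem pvZipSelfMap {α β : Type} (l : List α) (f : α → β) :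
    l.zip (l.map f) = l.map (fun x => (x, f x)) := by
  induction l with
  | nil => rfl
  | cons a l ih => simp [ih]

theorem pvGetD_insertFold_not_mem {ν : Type} (cf : String → ν) (v : ν) :
    ∀ (ts : List String) (d : PySem.Dict String ν) (t : String), t ∉ ts →
      (ts.foldl (fun d t' => d.insert t' (cf t')) d).getD t v = d.getD t v := by
  intro ts
  induction ts with
  | nil => intro d t _; rfl
  | cons a l ih =>
    intro d t ht
    rw [List.foldl_cons, ih _ _ (fun hm => ht (List.mem_cons_of_mem _ hm)), PySem.Dict.getD_insert]
    simp only [List.mem_cons, not_or] at ht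
    simp [ht.1]

theorem pvGetD_insertFold_mem (cf : String → Int) :
    ∀ (ts : List String) (d : PySem.Dict String Int) (t : String), t ∈ ts →
      (ts.foldl (fun d t' => d.insert t' (cf t')) d).getD t 0 = cf t := by
  intro ts
  induction ts with
  | nil => intro d t ht; cases ht
  | cons a l ih =>
    intro d t ht
    by_cases hl : t ∈ l
    · exact ih _ _ hl
    · have hta : t = a := by
        rcases List.mem_cons.mp ht with h | h
        · exact h
        · exact absurd h hl
      subst hta
      rw [List.foldl_cons, pvGetD_insertFold_not_mem cf 0 l _ _ hl, PySem.Dict.getD_insert_self]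

-- A's summary step = append B's block, given the parallel invariant on the two dicts
theorem pvSummary_eq (ts : List String) (m : Int) {G R} (h : pvPar ts G R)
    (st : List String × List String) (company : String) :
    pvASummary ts m G st company
      = (st.1 ++ (pvBBlock G R ts m company).1, st.2 ++ [(pvBBlock G R ts m company).2]) := by
  simp only [pvASummary, pvBBlock]
  have htot : (R.getD company []).foldl (fun tot f => (tot.zip f).map (fun q => q.1 + q.2)) (ts.map (fun _ => (0 : Int)))
      = ts.map (fun t => pvCnt (G.getD company []) t) := by
    rw [h.2 company, List.foldl_map]
    have hz := pvFoldZip ts (fun (p : Int × List (String × String)) t => if PySem.Str.isIn (PySem.Str.lower t) (pvTextOf p.2) then (1 : Int) else 0) (G.getD company []) (fun _ => 0)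
    simp only [pvFlags]
    rw [hz]
    simp [pvCnt]
  have hcnt : ∀ t ∈ ts, ((ts.foldl (fun d tech => d.insert tech (((G.getD company []).map (fun q => if PySem.Str.isIn (PySem.Str.lower tech) (pvTextOf q.2) then (1 : Int) else 0)).sum)) PySem.Dict.empty).getD t 0) = pvCnt (G.getD company []) t :=
    fun t ht => pvGetD_insertFold_mem (fun tech => pvCnt (G.getD company []) tech) ts PySem.Dict.empty t ht
  have hts : PySem.Str.join ", " (ts.map (fun t => t ++ ": " ++ PySem.Int.toStr ((ts.foldl (fun d tech => d.insert tech (((G.getD company []).map (fun q => if PySem.Str.isIn (PySem.Str.lower tech) (pvTextOf q.2) then (1 : Int) else 0)).sum)) PySem.Dict.empty).getD t 0) ++ "건"))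
      = PySem.Str.join ", " ((ts.zip ((R.getD company []).foldl (fun tot f => (tot.zip f).map (fun q => q.1 + q.2)) (ts.map (fun _ => (0 : Int))))).map (fun q => q.1 ++ ": " ++ PySem.Int.toStr q.2 ++ "건")) := by
    rw [htot, pvZipSelfMap, List.map_map]
    exact congrArg _ (List.map_congr_left (fun t ht => by rw [hcnt t ht]; rfl))
  rw [← hts, PySem.List.foldl_append_singleton_eq_map]
  by_cases hlen : ((G.getD company []).length : Int) > m
  · simp [hlen, List.append_assoc]
  · simp [hlen, List.append_assoc]

theorem pvPairFold {α β : Type} (f : α → List β) (gp : α → β) (cs : List α) :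
    ∀ s : List β × List β,
    cs.foldl (fun st c => (st.1 ++ f c, st.2 ++ [gp c])) s = (s.1 ++ (cs.map f).flatten, s.2 ++ cs.map gp) := by
  induction cs with
  | nil => intro s; simp
  | cons a l ih => intro s; simp [ih, List.append_assoc]

-- ===== VERDICT (by name: the statement is the Claim_ definition above) =====
theorem pvMain (es : List (List (String × String))) (comps ts : List String) (m : Int) :
    group_evidence_by_company_py es comps ts m = group_evidence_by_company_py_alt es comps ts m := by
  obtain ⟨hfst, hPar⟩ := pvGroupFold comps ts (PySem.List.enumerate es)
    (comps.foldl (fun d c => d.insert c []) PySem.Dict.empty)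
    (comps.foldl (fun d c => d.insert c []) PySem.Dict.empty) (pvPar_init ts comps)
  rw [hfst] at hPar
  show (PySem.Str.join "\n" (comps.foldl (pvASummary ts m (List.foldl (pvAStep comps) (comps.foldl (fun d c => d.insert c []) PySem.Dict.empty) (PySem.List.enumerate es))) ([], [])).1,
        (List.foldl (pvAStep comps) (comps.foldl (fun d c => d.insert c []) PySem.Dict.empty) (PySem.List.enumerate es)).items,
        PySem.Str.join "\n" (comps.foldl (pvASummary ts m (List.foldl (pvAStep comps) (comps.foldl (fun d c => d.insert c []) PySem.Dict.empty) (PySem.List.enumerate es))) ([], [])).2)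
      = (PySem.Str.join "\n" ((comps.map (pvBBlock ((PySem.List.enumerate es).foldl (pvBStep (comps.map (fun c => (c, PySem.Str.lower c))) (ts.map PySem.Str.lower)) ((comps.foldl (fun d c => d.insert c []) PySem.Dict.empty), (comps.foldl (fun d c => d.insert c []) PySem.Dict.empty))).1 ((PySem.List.enumerate es).foldl (pvBStep (comps.map (fun c => (c, PySem.Str.lower c))) (ts.map PySem.Str.lower)) ((comps.foldl (fun d c => d.insert c []) PySem.Dict.empty), (comps.foldl (fun d c => d.insert c []) PySem.Dict.empty))).2 ts m)).flatMap (·.1)),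
        ((PySem.List.enumerate es).foldl (pvBStep (comps.map (fun c => (c, PySem.Str.lower c))) (ts.map PySem.Str.lower)) ((comps.foldl (fun d c => d.insert c []) PySem.Dict.empty), (comps.foldl (fun d c => d.insert c []) PySem.Dict.empty))).1.items,
        PySem.Str.join "\n" ((comps.map (pvBBlock ((PySem.List.enumerate es).foldl (pvBStep (comps.map (fun c => (c, PySem.Str.lower c))) (ts.map PySem.Str.lower)) ((comps.foldl (fun d c => d.insert c []) PySem.Dict.empty), (comps.foldl (fun d c => d.insert c []) PySem.Dict.empty))).1 ((PySem.List.enumerate es).foldl (pvBStep (comps.map (fun c => (c, PySem.Str.lower c))) (ts.map PySem.Str.lower)) ((comps.foldl (fun d c => d.insert c []) PySem.Dict.empty), (comps.foldl (fun d c => d.insert c []) PySem.Dict.empty))).2 ts m)).map (·.2)))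
  rw [hfst]
  rw [show pvASummary ts m (List.foldl (pvAStep comps) (comps.foldl (fun d c => d.insert c []) PySem.Dict.empty) (PySem.List.enumerate es))
      = (fun st c => (st.1 ++ (pvBBlock (List.foldl (pvAStep comps) (comps.foldl (fun d c => d.insert c []) PySem.Dict.empty) (PySem.List.enumerate es)) ((PySem.List.enumerate es).foldl (pvBStep (comps.map (fun c => (c, PySem.Str.lower c))) (ts.map PySem.Str.lower)) ((comps.foldl (fun d c => d.insert c []) PySem.Dict.empty), (comps.foldl (fun d c => d.insert c []) PySem.Dict.empty))).2 ts m c).1,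
                      st.2 ++ [(pvBBlock (List.foldl (pvAStep comps) (comps.foldl (fun d c => d.insert c []) PySem.Dict.empty) (PySem.List.enumerate es)) ((PySem.List.enumerate es).foldl (pvBStep (comps.map (fun c => (c, PySem.Str.lower c))) (ts.map PySem.Str.lower)) ((comps.foldl (fun d c => d.insert c []) PySem.Dict.empty), (comps.foldl (fun d c => d.insert c []) PySem.Dict.empty))).2 ts m c).2]))
      from funext fun st => funext fun c => pvSummary_eq ts m hPar st c]
  rw [pvPairFold]
  simp only [List.flatMap_def, List.map_map]
  rfl

-- ===== VERDICT (by name: the statement is the Claim_ definition above) =====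
theorem group_evidence_by_company_py_spec : Claim_equal_group_evidence_by_company_py := by
  intro es comps ts m _
  exact pvMain es comps ts m
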